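-- pv_equiv track=rewrite | github.com/JeremyBerry/VenC | test/indexSpeedTest.py | algo2
-- ===== SOURCE A (Python) =====
-- def algo2(string):
--     op = []
--     cp = []
--     l = len(string)
--     fields=[]
--     for i in range(0, l):
--         if string[i:i+2] == ".:":
--             op.append(i)
--
--         elif string[i:i+2] == ":.":
--             cp.append(i)
--
--         if len(cp) <= len(op) and len(cp) != 0 and len(op) != 0:
--             if op[-1] < cp[-1]:
--                 fields = [field.strip() for field in string[op[-1]+2:cp[-1]].split("::") if field != '']
--
--                 return algo2(string[:op[-1]]+"["+'---'.join(fields)+"]"+string[cp[-1]+2:])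
--
--     return string
-- ===== SOURCE B (Python) =====
-- def algo2(string):
--     # Iteratively reduce the innermost .:...:. marker until none is reducible:
--     # a scanner returns the first reducible close and the open it pairs with,
--     # and the pair is rewritten in place; no recursion, no position lists.
--     while True:
--         found = _innermost_pair(string)
--         if found is None:
--             return string
--         o, d = found
--         fields = [f.strip() for f in string[o + 2:d].split("::") if f != '']
--         string = string[:o] + "[" + "---".join(fields) + "]" + string[d + 2:]
--
--
-- def _innermost_pair(string):
--     # First ":." whose running close count does not exceed the running open
--     # count, paired with the most recent ".:" before it.
--     opens = closes = 0
--     last_open = None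
--     for i in range(len(string)):
--         if string.startswith(".:", i):
--             opens += 1
--             last_open = i
--         elif string.startswith(":.", i):
--             closes += 1
--             if closes <= opens and last_open is not None:
--                 return last_open, i
--     return None
-- ===== Notes on version B (the rewrite author's own statement) =====
-- stated objective: simpler
-- what changed: A recurses on the rewritten string, accumulating op/cp position lists and re-checking a four-clause firing condition after every index with two-character slices; B is an iterative loop around a small scanner that keeps just two counters and the last open position and returns the first reducible close directly.
import Mathlib
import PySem

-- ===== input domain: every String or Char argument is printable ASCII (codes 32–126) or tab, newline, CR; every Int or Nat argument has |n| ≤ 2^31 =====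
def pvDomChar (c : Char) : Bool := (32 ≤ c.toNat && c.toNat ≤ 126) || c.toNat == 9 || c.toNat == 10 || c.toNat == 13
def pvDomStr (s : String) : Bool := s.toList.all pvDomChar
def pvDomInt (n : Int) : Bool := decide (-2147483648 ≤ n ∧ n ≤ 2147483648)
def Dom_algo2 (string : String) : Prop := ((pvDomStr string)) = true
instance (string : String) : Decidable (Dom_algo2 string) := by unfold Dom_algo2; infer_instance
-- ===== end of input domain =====

-- B replaces A's recursion-with-position-lists by an iterative loop around a small
-- counter-based scanner that returns the first reducible pair directly (objective: simpler).

-- ===== PORT A =====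
-- the fields/"[...]" rewrite expression; this line is verbatim identical in Source A and Source B,
-- so both ports share this one transliteration of it:
-- string[:o] + "[" + '---'.join(f.strip() for f in string[o+2:d].split("::") if f != '') + "]" + string[d+2:]
def pvRewrite (s : List Char) (o d : Int) : List Char :=
  let fields := ((PySem.Chars.splitOn (PySem.Chars.slice s (some (o + 2)) (some d)) [':', ':']).filter
    (fun f => f ≠ [])).map PySem.Chars.strip
  PySem.Chars.slice s none (some o) ++
    ('[' :: PySem.Chars.join ['-', '-', '-'] fields ++ [']']) ++
      PySem.Chars.slice s (some (d + 2)) none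

-- A's 'for i in range(0, l)' loop over op/cp position lists; 'some t' is the early
-- 'return algo2(t)' (the argument of the recursive call)
def algo2Loop (s : List Char) : List Int → List Int → List Int → Option (List Char)
  | [], _, _ => none
  | i :: rest, op, cp =>
    let w := PySem.Chars.slice s (some i) (some (i + 2))
    let op := if w = ['.', ':'] then op ++ [i] else op
    let cp := if w ≠ ['.', ':'] ∧ w = [':', '.'] then cp ++ [i] else cp
    if cp.length ≤ op.length ∧ cp.length ≠ 0 ∧ op.length ≠ 0 then
      if PySem.List.pyGetD op (-1) 0 < PySem.List.pyGetD cp (-1) 0 then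
        some (pvRewrite s (PySem.List.pyGetD op (-1) 0) (PySem.List.pyGetD cp (-1) 0))
      else algo2Loop s rest op cp
    else algo2Loop s rest op cp

-- A's recursion; the fuel argument only makes the recursion total (each recursive call
-- strictly reduces the number of ".:" occurrences, so length+1 rounds cannot run out)
def algo2Go : Nat → List Char → List Char
  | 0, s => s
  | f + 1, s =>
    match algo2Loop s (PySem.List.pyRange 0 (s.length : Int) 1) [] [] with
    | none => s
    | some t => algo2Go f t

def algo2 (string : String) : String :=
  String.ofList (algo2Go (string.toList.length + 1) string.toList)

-- ===== PORT B =====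
-- string.startswith(p, i) for 0 ≤ i (the only indices B uses): exact — Python compares
-- p against the text from offset i, False when fewer than len(p) characters remain
def startsAt (s p : List Char) (i : Int) : Bool := p.isPrefixOf (s.drop i.toNat)

-- B's scanner _innermost_pair: two counters and the last open position
def findLoop (s : List Char) : List Int → Int → Int → Option Int → Option (Int × Int)
  | [], _, _, _ => none
  | i :: rest, opens, closes, last =>
    if startsAt s ['.', ':'] i then
      findLoop s rest (opens + 1) closes (some i)
    else if startsAt s [':', '.'] i then
      if closes + 1 ≤ opens ∧ last.isSome then some (last.getD 0, i)
      else findLoop s rest opens (closes + 1) last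
    else findLoop s rest opens closes last

-- B's 'while True' rewrite loop; same totality fuel as A's port
def algo2AltGo : Nat → List Char → List Char
  | 0, s => s
  | f + 1, s =>
    match findLoop s (PySem.List.pyRange 0 (s.length : Int) 1) 0 0 none with
    | none => s
    | some (o, d) => algo2AltGo f (pvRewrite s o d)

def algo2_alt (string : String) : String :=
  String.ofList (algo2AltGo (string.toList.length + 1) string.toList)

-- ===== PRECONDITION & SPEC =====
def Spec_algo2 (string : String) (out : String) : Prop := out = algo2_alt string
instance (string : String) (out : String) : Decidable (Spec_algo2 string out) := by
  unfold Spec_algo2; infer_instance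

-- ===== CLAIM (what is proved, stated in full; the proofs are below) =====
def Claim_equal_algo2 : Prop := ∀ (string : String), Dom_algo2 string → Spec_algo2 string (algo2 string)

-- ===== LEMMAS AND PROOFS =====

-- "no fire pending": A's four-clause condition is false for the current op/cp lists
def NF (op cp : List Int) : Prop :=
  ¬ (cp.length ≤ op.length ∧ cp.length ≠ 0 ∧ op.length ≠ 0 ∧
      PySem.List.pyGetD op (-1) 0 < PySem.List.pyGetD cp (-1) 0)

lemma window_eq (s : List Char) (i : Int) (hi : 0 ≤ i) :
    PySem.Chars.slice s (some i) (some (i + 2)) = (s.drop i.toNat).take 2 := by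
  rw [PySem.Chars.slice_eq_listSlice, PySem.List.slice_toNat s hi (by omega)]
  congr 1
  omega

lemma startsAt_iff (s p : List Char) (i : Int) (hp : p.length = 2) :
    startsAt s p i = true ↔ (s.drop i.toNat).take 2 = p := by
  unfold startsAt
  rw [List.isPrefixOf_iff_prefix, List.prefix_iff_eq_take, hp, eq_comm]

lemma loop_eq (s : List Char) (idxs : List Int) :
    ∀ (op cp : List Int) (opens closes : Int) (last : Option Int),
      (∀ j ∈ idxs, 0 ≤ j) → idxs.Pairwise (· < ·) →
      (∀ x ∈ op, ∀ j ∈ idxs, x < j) → (∀ x ∈ cp, ∀ j ∈ idxs, x < j) →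
      (op.length : Int) = opens → (cp.length : Int) = closes →
      op.getLast? = last → NF op cp →
      algo2Loop s idxs op cp =
        (findLoop s idxs opens closes last).map (fun p => pvRewrite s p.1 p.2) := by
  induction idxs with
  | nil => intros; rfl
  | cons i rest ih =>
    intro op cp opens closes last h0 hpw hop hcp hlo hlc hlast hnf
    have hi0 : (0 : Int) ≤ i := h0 i (by simp)
    have hrest0 : ∀ j ∈ rest, 0 ≤ j := fun j hj => h0 j (by simp [hj])
    have hpwr : rest.Pairwise (· < ·) := hpw.tail
    have hilt : ∀ j ∈ rest, i < j := by
      intro j hj; exact (List.pairwise_cons.1 hpw).1 j hj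
    rw [algo2Loop, findLoop, window_eq s i hi0]
    by_cases hopen : (s.drop i.toNat).take 2 = ['.', ':']
    · -- open marker at i
      have hcne : ¬(¬((s.drop i.toNat).take 2 = ['.', ':']) ∧
          (s.drop i.toNat).take 2 = [':', '.']) := fun h => h.1 hopen
      rw [if_pos hopen, if_neg hcne, if_pos ((startsAt_iff s _ i rfl).2 hopen)]
      have hgetop : PySem.List.pyGetD (op ++ [i]) (-1) 0 = i :=
        PySem.List.pyGetD_neg_one_append_singleton _ _ _
      have hcplt : cp ≠ [] → PySem.List.pyGetD cp (-1) 0 < i := by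
        intro hcpe
        rw [PySem.List.pyGetD_neg_one cp 0 hcpe]
        exact hcp _ (List.getLast_mem hcpe) i (by simp)
      have hih : algo2Loop s rest (op ++ [i]) cp =
          (findLoop s rest (opens + 1) closes (some i)).map (fun p => pvRewrite s p.1 p.2) := by
        refine ih (op ++ [i]) cp (opens + 1) closes (some i) hrest0 hpwr ?_ ?_ ?_ hlc (by simp) ?_
        · intro x hx j hj
          rcases List.mem_append.1 hx with hx | hx
          · exact hop x hx j (by simp [hj])
          · simp only [List.mem_singleton] at hx
            exact hx ▸ hilt j hj
        · intro x hx j hj; exact hcp x hx j (by simp [hj])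
        · simp only [List.length_append, List.length_cons, List.length_nil]
          push_cast
          omega
        · intro hcond
          have hcpe : cp ≠ [] := by intro he; exact hcond.2.1 (by simp [he])
          have hlt := hcond.2.2.2
          rw [hgetop] at hlt
          exact absurd hlt (by have := hcplt hcpe; omega)
      split_ifs with h1 h2
      · exfalso
        have hcpe : cp ≠ [] := by intro he; exact h1.2.1 (by simp [he])
        rw [hgetop] at h2
        exact absurd h2 (by have := hcplt hcpe; omega)
      · exact hih
      · exact hih
    · -- not an open marker
      have hswo : ¬(startsAt s ['.', ':'] i = true) := by
        rw [startsAt_iff s _ i rfl]; exact hopen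
      rw [if_neg hopen, if_neg hswo]
      by_cases hclose : (s.drop i.toNat).take 2 = [':', '.']
      · -- close marker at i
        have hcc : (s.drop i.toNat).take 2 ≠ ['.', ':'] ∧ (s.drop i.toNat).take 2 = [':', '.'] :=
          ⟨hopen, hclose⟩
        rw [if_pos hcc, if_pos ((startsAt_iff s _ i rfl).2 hclose)]
        have hgetcp : PySem.List.pyGetD (cp ++ [i]) (-1) 0 = i :=
          PySem.List.pyGetD_neg_one_append_singleton _ _ _
        by_cases hfire : cp.length + 1 ≤ op.length ∧ op ≠ []
        · -- both sides fire and return the same pair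
          have hople : op.getLast? = some (op.getLast hfire.2) := List.getLast?_eq_some_getLast hfire.2
          have hoplt : PySem.List.pyGetD op (-1) 0 < i := by
            rw [PySem.List.pyGetD_neg_one op 0 hfire.2]
            exact hop _ (List.getLast_mem hfire.2) i (by simp)
          have houter : (cp ++ [i]).length ≤ op.length ∧ (cp ++ [i]).length ≠ 0 ∧
              op.length ≠ 0 := by
            refine ⟨by simpa using hfire.1, by simp, by simp [hfire.2]⟩
          have hinner : PySem.List.pyGetD op (-1) 0 < PySem.List.pyGetD (cp ++ [i]) (-1) 0 := by
            rw [hgetcp]; exact hoplt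
          have hbfire : closes + 1 ≤ opens ∧ last.isSome := by
            refine ⟨by omega, by rw [← hlast, hople]; simp⟩
          rw [if_pos houter, if_pos hinner, if_pos hbfire]
          simp only [Option.map_some]
          rw [hgetcp, PySem.List.pyGetD_neg_one op 0 hfire.2, ← hlast, hople, Option.getD_some]
        · -- no fire: both sides recurse with the close recorded
          have houter : ¬((cp ++ [i]).length ≤ op.length ∧ (cp ++ [i]).length ≠ 0 ∧
              op.length ≠ 0) := by
            simp only [List.length_append, List.length_cons, List.length_nil]
            intro h
            exact hfire ⟨by omega, by intro he; exact h.2.2 (by simp [he])⟩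
          have hbno : ¬(closes + 1 ≤ opens ∧ last.isSome) := by
            intro h
            refine hfire ⟨by omega, ?_⟩
            intro he
            rw [← hlast] at h
            simp [he] at h
          rw [if_neg houter, if_neg hbno]
          refine ih op (cp ++ [i]) opens (closes + 1) last hrest0 hpwr ?_ ?_ hlo ?_ hlast ?_
          · intro x hx j hj; exact hop x hx j (by simp [hj])
          · intro x hx j hj
            rcases List.mem_append.1 hx with hx | hx
            · exact hcp x hx j (by simp [hj])
            · simp only [List.mem_singleton] at hx
              exact hx ▸ hilt j hj
          · simp only [List.length_append, List.length_cons, List.length_nil]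
            push_cast
            omega
          · intro hcond
            refine hfire ⟨?_, ?_⟩
            · have := hcond.1
              simp only [List.length_append, List.length_cons, List.length_nil] at this
              omega
            · intro he; exact hcond.2.2.1 (by simp [he])
      · -- plain character: state unchanged; A's pending condition is still false
        have hswc : ¬(startsAt s [':', '.'] i = true) := by
          rw [startsAt_iff s _ i rfl]; exact hclose
        have hccn : ¬((s.drop i.toNat).take 2 ≠ ['.', ':'] ∧ (s.drop i.toNat).take 2 = [':', '.']) :=
          fun h => hclose h.2
        rw [if_neg hccn, if_neg hswc]
        have hih : algo2Loop s rest op cp =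
            (findLoop s rest opens closes last).map (fun p => pvRewrite s p.1 p.2) := by
          refine ih op cp opens closes last hrest0 hpwr ?_ ?_ hlo hlc hlast hnf
          · intro x hx j hj; exact hop x hx j (by simp [hj])
          · intro x hx j hj; exact hcp x hx j (by simp [hj])
        split_ifs with h1 h2
        · exact absurd ⟨h1.1, h1.2.1, h1.2.2, h2⟩ hnf
        · exact hih
        · exact hih

lemma pvRound_eq (s : List Char) :
    algo2Loop s (PySem.List.pyRange 0 (s.length : Int) 1) [] [] =
      (findLoop s (PySem.List.pyRange 0 (s.length : Int) 1) 0 0 none).map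
        (fun p => pvRewrite s p.1 p.2) := by
  refine loop_eq s _ [] [] 0 0 none ?_ ?_ ?_ ?_ rfl rfl rfl ?_
  · intro j hj; exact (PySem.List.mem_pyRange_one.1 hj).1
  · exact PySem.List.pairwise_lt_pyRange_one _ _
  · intro x hx; simp at hx
  · intro x hx; simp at hx
  · simp [NF]

lemma pvGo_eq (f : Nat) : ∀ s : List Char, algo2Go f s = algo2AltGo f s := by
  induction f with
  | zero => intro s; rfl
  | succ f ih =>
    intro s
    rw [algo2Go, algo2AltGo, pvRound_eq]
    cases h : findLoop s (PySem.List.pyRange 0 (s.length : Int) 1) 0 0 none with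
    | none => rfl
    | some p => simp only [Option.map_some]; exact ih _

-- ===== VERDICT (by name: the statement is the Claim_ definition above) =====
theorem algo2_spec : Claim_equal_algo2 := by
  intro string _
  unfold Spec_algo2 algo2 algo2_alt
  rw [pvGo_eq]
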